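-- pv_equiv track=rewrite | github.com/whalsrb100/python | gamble/myproj_c3.py | getValidHistoryList
-- ===== SOURCE A (Python) =====
-- def getValidHistoryList(n, info):
--     validHistoryList = []
--     for i in range(n,n+1):
--         validHistoryDict = {}
--         for j in range(0, len(info)):
--             try: validHistoryDict[info[j][i]] += 1
--             except KeyError: validHistoryDict[info[j][i]] = 1
--
--     #keysList = list(validHistoryDict)
--     #keysList = list(dict(  sorted(validHistoryDict.items(), key=(lambda x: x[0]) ,reverse=False)))
--     if    n == 0: keysList = list(dict(  sorted(validHistoryDict.items(), key=(lambda x: x[0]) ,reverse=True)))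
--     elif n == 1: keysList = list(dict(  sorted(validHistoryDict.items(), key=(lambda x: x[0]) ,reverse=True)))
--     elif n == 2: keysList = list(dict(  sorted(validHistoryDict.items(), key=(lambda x: x[0]) ,reverse=True)))
--     elif n == 3: keysList = list(dict(  sorted(validHistoryDict.items(), key=(lambda x: x[0]) ,reverse=False)))
--     elif n == 4: keysList = list(dict(  sorted(validHistoryDict.items(), key=(lambda x: x[0]) ,reverse=False)))
--     elif n == 5: keysList = list(dict(  sorted(validHistoryDict.items(), key=(lambda x: x[0]) ,reverse=False)))
--
--     for i in range(0,len(keysList)):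
--         validHistoryList.append(keysList[i])
--         validHistoryList.append(validHistoryDict[keysList[i]])
--         validHistoryList.append(0)
--     return validHistoryList
-- ===== SOURCE B (Python) =====
-- def getValidHistoryList(n, info):
--     column = sorted((row[n] for row in info), reverse=(n < 3))
--     if not column:
--         return []
--     out = []
--     k, c = column[0], 1
--     for x in column[1:]:
--         if x == k:
--             c += 1
--         else:
--             out += [k, c, 0]
--             k, c = x, 1
--     out += [k, c, 0]
--     return out
-- ===== Notes on version B (the rewrite author's own statement) =====
-- stated objective: alternative
-- what changed: Replaces dict counting (try/except increment) followed by an items-sort/dict-rebuild and an index loop over the keys by sort-then-group: sort the whole extracted column once and emit [key,count,0] triples in a single run-length pass over consecutive equal values.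
import Mathlib
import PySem

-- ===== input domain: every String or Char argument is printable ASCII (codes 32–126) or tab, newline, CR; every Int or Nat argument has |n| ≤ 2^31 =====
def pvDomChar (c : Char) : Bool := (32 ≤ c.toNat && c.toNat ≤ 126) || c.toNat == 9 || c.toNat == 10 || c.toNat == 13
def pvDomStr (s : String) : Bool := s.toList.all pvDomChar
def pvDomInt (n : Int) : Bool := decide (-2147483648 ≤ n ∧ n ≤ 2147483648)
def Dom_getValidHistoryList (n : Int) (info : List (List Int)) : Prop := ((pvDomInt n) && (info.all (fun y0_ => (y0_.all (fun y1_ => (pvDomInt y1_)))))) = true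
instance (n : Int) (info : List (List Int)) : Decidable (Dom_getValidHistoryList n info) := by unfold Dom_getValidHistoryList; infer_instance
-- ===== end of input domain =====

-- B replaces A's dict counting + items-sort/dict-rebuild + key-index loop by sort-then-group:
-- sort the column once, then a single run-length pass over consecutive equal values; alternative, not faster.

-- ===== PORT A =====
-- the nested counting loops: for i in range(n, n+1): validHistoryDict = {}; for j in range(0, len(info)): try/except increment
def pvDictA (n : Int) (info : List (List Int)) : PySem.Dict Int Int :=
  (PySem.List.pyRange n (n + 1)).foldl
    (fun _ i =>
      (PySem.List.pyRange 0 (PySem.List.len info)).foldl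
        (fun d j =>
          d.insert (PySem.List.pyGetD (PySem.List.pyGetD info j []) i 0)
            (d.getD (PySem.List.pyGetD (PySem.List.pyGetD info j []) i 0) 0 + 1))
        PySem.Dict.empty)
    PySem.Dict.empty

-- keysList = list(dict(sorted(validHistoryDict.items(), key=(lambda x: x[0]), reverse=rev)))
def pvKeysA (d : PySem.Dict Int Int) (rev : Bool) : List Int :=
  ((PySem.List.sorted d.items (fun p => p.1) rev).foldl
      (fun d2 p => d2.insert p.1 p.2) PySem.Dict.empty).keys

-- the output loop: for i in range(0, len(keysList)): three appends
def pvOutA (d : PySem.Dict Int Int) (keysList : List Int) : List Int :=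
  (PySem.List.pyRange 0 (PySem.List.len keysList)).foldl
    (fun acc i =>
      ((acc ++ [PySem.List.pyGetD keysList i 0])
        ++ [d.getD (PySem.List.pyGetD keysList i 0) 0]) ++ [0])
    []

def getValidHistoryList (n : Int) (info : List (List Int)) : List Int :=
  let d := pvDictA n info
  let keysList : List Int :=
    if n == 0 then pvKeysA d true
    else if n == 1 then pvKeysA d true
    else if n == 2 then pvKeysA d true
    else if n == 3 then pvKeysA d false
    else if n == 4 then pvKeysA d false
    else if n == 5 then pvKeysA d false
    else []  -- Python: keysList is unbound here (NameError); these inputs are outside Pre_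
  pvOutA d keysList

-- ===== PORT B =====
-- one step of the run-length loop: `if x == k: c += 1 else: out += [k, c, 0]; k, c = x, 1`
def pvStep (s : List Int × Int × Int) (x : Int) : List Int × Int × Int :=
  if x == s.2.1 then (s.1, s.2.1, s.2.2 + 1) else (s.1 ++ [s.2.1, s.2.2, 0], x, 1)

def getValidHistoryList_alt (n : Int) (info : List (List Int)) : List Int :=
  let column := PySem.List.sorted (info.map (fun row => PySem.List.pyGetD row n 0))
                  (fun x => x) (decide (n < 3))
  match column with
  | [] => []
  | k :: rest =>
      let s := rest.foldl pvStep ([], k, 1)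
      s.1 ++ [s.2.1, s.2.2, 0]

-- ===== PRECONDITION & SPEC =====
-- Pre_ excludes exactly the inputs on which Python A raises: n outside {0..5} (NameError on
-- keysList) and rows shorter than n+1 (IndexError on info[j][n]).
def Pre_getValidHistoryList (n : Int) (info : List (List Int)) : Prop :=
  (n = 0 ∨ n = 1 ∨ n = 2 ∨ n = 3 ∨ n = 4 ∨ n = 5) ∧ ∀ row ∈ info, n < (row.length : Int)
instance (n : Int) (info : List (List Int)) : Decidable (Pre_getValidHistoryList n info) := by
  unfold Pre_getValidHistoryList; infer_instance

def pvWitness_getValidHistoryList : Int × List (List Int) := (0, [[1], [2], [1]])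

def Spec_getValidHistoryList (n : Int) (info : List (List Int)) (out : List Int) : Prop := out = getValidHistoryList_alt n info
instance (n : Int) (info : List (List Int)) (out : List Int) : Decidable (Spec_getValidHistoryList n info out) := by unfold Spec_getValidHistoryList; infer_instance

-- ===== CLAIM (what is proved, stated in full; the proofs are below) =====
def Claim_equal_getValidHistoryList : Prop := ∀ (n : Int) (info : List (List Int)), Dom_getValidHistoryList n info → Pre_getValidHistoryList n info → Spec_getValidHistoryList n info (getValidHistoryList n info)

-- ===== LEMMAS AND PROOFS =====

-- A's counting dict is the counter of the extracted column.
lemma pvDictA_eq (n : Int) (info : List (List Int)) :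
    pvDictA n info = PySem.Dict.counter (info.map (fun row => PySem.List.pyGetD row n 0)) := by
  unfold pvDictA
  rw [PySem.List.pyRange_one_cons (by omega : n < n + 1)]
  rw [show PySem.List.pyRange (n + 1) (n + 1) = [] from by simp [PySem.List.pyRange]]
  simp only [List.foldl_cons, List.foldl_nil]
  have h := PySem.List.foldl_pyRange_pyGetD info [] (fun d row =>
        d.insert (PySem.List.pyGetD row n 0) (d.getD (PySem.List.pyGetD row n 0) 0 + 1))
        (PySem.Dict.empty : PySem.Dict Int Int) (le_refl 0)
  refine h.trans ?_
  simp only [Int.toNat_zero, List.drop_zero]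
  rw [← PySem.Dict.foldl_insert_getD_add_one_eq_counter, List.foldl_map]

-- the sorted distinct keys of a column are strictly ordered in the flag's direction
lemma sortedSet_pairwise (column : List Int) (rev : Bool) :
    List.Pairwise (fun a b : Int => if rev then b < a else a < b)
      (PySem.List.sorted (PySem.Set.ofList column) (fun x => x) rev) := by
  cases rev with
  | false => simpa using PySem.List.sorted_ofList_pairwise_lt column
  | true =>
      have hnd : (PySem.List.sorted (PySem.Set.ofList column) (fun x => x) true).Nodup :=
        (PySem.List.sorted_perm _ _ _).nodup_iff.mpr (PySem.Set.nodup_ofList column)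
      have hle := PySem.List.sorted_pairwise_rev (PySem.Set.ofList column) (fun x : Int => x)
      have := List.Pairwise.and hle hnd
      exact this.imp (fun {a b} h => by simpa using lt_of_le_of_ne h.1 (Ne.symm h.2))

-- A's keysList over the counter of a column is the sorted distinct-value list.
lemma pvKeysA_counter_eq (column : List Int) (rev : Bool) :
    pvKeysA (PySem.Dict.counter column) rev
      = PySem.List.sorted (PySem.Set.ofList column) (fun x => x) rev := by
  set ys := PySem.List.sorted (PySem.Set.ofList column) (fun x => x) rev with hys
  have hysperm : ys.Perm (PySem.Set.ofList column) := PySem.List.sorted_perm _ _ _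
  have hysnd : ys.Nodup := hysperm.nodup_iff.mpr (PySem.Set.nodup_ofList column)
  have hpairs := sortedSet_pairwise column rev
  rw [← hys] at hpairs
  have hitems : PySem.List.sorted (PySem.Dict.counter column).items (fun p => p.1) rev
      = ys.map (fun k => (k, (column.count k : Int))) := by
    have hperm : (ys.map (fun k => (k, (column.count k : Int)))).Perm
        (PySem.Dict.counter column).items := by
      rw [PySem.Dict.items_counter]
      exact hysperm.map _
    have hpw : List.Pairwise
        (fun a b : Int × Int => if rev then b.1 < a.1 else a.1 < b.1)
        (ys.map (fun k => (k, (column.count k : Int)))) :=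
      (List.pairwise_map).mpr hpairs
    cases rev with
    | false => exact PySem.List.sorted_eq_of_perm_of_pairwise_lt _ _ _ hperm (by simpa using hpw)
    | true => exact PySem.List.sorted_rev_eq_of_perm_of_pairwise_gt _ _ _ hperm (by simpa using hpw)
  unfold pvKeysA
  rw [hitems, PySem.Dict.keys, PySem.Dict.items_foldl_insert_fresh
        (ys.map (fun k => (k, (column.count k : Int)))) (fun p => p.1) (fun p => p.2)
        PySem.Dict.empty (by intro a _; rfl)
        (by simpa [List.map_map, Function.comp_def] using hysnd)]
  simp [List.map_map, Function.comp_def, PySem.Dict.empty]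

-- the output loop over the sorted distinct keys is a flatMap of triples
lemma pvOutA_eq (column : List Int) (rev : Bool) :
    pvOutA (PySem.Dict.counter column)
        (PySem.List.sorted (PySem.Set.ofList column) (fun x => x) rev)
      = (PySem.List.sorted (PySem.Set.ofList column) (fun x => x) rev).flatMap
          (fun k => [k, (column.count k : Int), 0]) := by
  unfold pvOutA
  have h := PySem.List.foldl_pyRange_pyGetD
        (PySem.List.sorted (PySem.Set.ofList column) (fun x => x) rev) 0
        (fun acc k => ((acc ++ [k]) ++ [(PySem.Dict.counter column).getD k 0]) ++ [0])
        [] (le_refl 0)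
  refine h.trans ?_
  simp only [Int.toNat_zero, List.drop_zero]
  have hext : (PySem.List.sorted (PySem.Set.ofList column) (fun x => x) rev).foldl
        (fun acc k => ((acc ++ [k]) ++ [(PySem.Dict.counter column).getD k 0]) ++ [0]) []
      = (PySem.List.sorted (PySem.Set.ofList column) (fun x => x) rev).foldl
        (fun acc k => acc ++ [k, (column.count k : Int), 0]) [] := by
    apply List.foldl_ext
    intro acc k _
    simp [PySem.Dict.getD_counter]
  rw [hext, PySem.List.foldl_append_eq_flatMap]
  simp

-- count of v in a flatMap of per-key replicates over a nodup key list
lemma count_flatMap_replicate (ks : List Int) (c : Int → Nat) (hnd : ks.Nodup) (v : Int) :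
    (ks.flatMap (fun k => List.replicate (c k) k)).count v
      = if v ∈ ks then c v else 0 := by
  induction ks with
  | nil => simp
  | cons k ks ih =>
      rcases List.nodup_cons.mp hnd with ⟨hk, hnd'⟩
      simp only [List.flatMap_cons, List.count_append, List.count_replicate, ih hnd',
        List.mem_cons]
      by_cases hv : v = k
      · subst hv; simp [hk]
      · simp [hv, Ne.symm hv]

-- concatenated runs of a strictly ordered key list are (non-strictly) ordered
lemma flatMap_replicate_pairwise (c : Int → Nat) (rev : Bool) :
    ∀ (ks : List Int), List.Pairwise (fun a b : Int => if rev then b < a else a < b) ks →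
      List.Pairwise (fun a b : Int => if rev then b ≤ a else a ≤ b)
        (ks.flatMap (fun k => List.replicate (c k) k)) := by
  intro ks
  induction ks with
  | nil => intro _; simp
  | cons k ks ih =>
      intro hkpairs
      rcases List.pairwise_cons.mp hkpairs with ⟨hk, htl⟩
      simp only [List.flatMap_cons]
      rw [List.pairwise_append]
      refine ⟨List.pairwise_replicate.mpr (by cases rev <;> simp), ih htl, ?_⟩
      intro a ha b hb
      have ha' : a = k := List.eq_of_mem_replicate ha
      obtain ⟨j, hj, hb'⟩ := List.mem_flatMap.mp hb
      have hb'' : b = j := List.eq_of_mem_replicate hb'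
      subst ha'; subst hb''
      have hkj := hk _ hj
      cases rev <;> simp at hkj ⊢ <;> omega

-- sorting a column = concatenating the runs of each distinct key in sorted order
lemma sorted_decomp (column : List Int) (rev : Bool) :
    PySem.List.sorted column (fun x => x) rev
      = (PySem.List.sorted (PySem.Set.ofList column) (fun x => x) rev).flatMap
          (fun k => List.replicate (column.count k) k) := by
  set ks := PySem.List.sorted (PySem.Set.ofList column) (fun x => x) rev with hks
  have hksperm : ks.Perm (PySem.Set.ofList column) := PySem.List.sorted_perm _ _ _
  have hksnd : ks.Nodup := hksperm.nodup_iff.mpr (PySem.Set.nodup_ofList column)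
  have hkpairs := sortedSet_pairwise column rev
  rw [← hks] at hkpairs
  have hperm : (ks.flatMap (fun k => List.replicate (column.count k) k)).Perm column := by
    rw [List.perm_iff_count]
    intro v
    rw [count_flatMap_replicate ks _ hksnd v]
    by_cases hv : v ∈ column
    · have hvk : v ∈ ks := by
        rw [hks, PySem.List.mem_sorted, PySem.Set.mem_ofList]; exact hv
      simp [hvk]
    · have hvk : v ∉ ks := by
        rw [hks, PySem.List.mem_sorted, PySem.Set.mem_ofList]; exact hv
      simp [hvk, List.count_eq_zero_of_not_mem hv]
  have hpw : List.Pairwise (fun a b : Int => if rev then b ≤ a else a ≤ b)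
      (ks.flatMap (fun k => List.replicate (column.count k) k)) :=
    flatMap_replicate_pairwise _ rev ks hkpairs
  cases rev with
  | false =>
      refine List.Perm.eq_of_pairwise (le := fun a b : Int => a ≤ b) ?_
        (by simpa using PySem.List.sorted_pairwise column (fun x : Int => x))
        (by simpa using hpw)
        ((PySem.List.sorted_perm column (fun x => x) false).trans hperm.symm)
      exact fun a b _ _ h1 h2 => le_antisymm h1 h2
  | true =>
      refine List.Perm.eq_of_pairwise (le := fun a b : Int => b ≤ a) ?_
        (by simpa using PySem.List.sorted_pairwise_rev column (fun x : Int => x))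
        (by simpa using hpw)
        ((PySem.List.sorted_perm column (fun x => x) true).trans hperm.symm)
      exact fun a b _ _ h1 h2 => le_antisymm h2 h1

-- the run-length step absorbs a replicate of the current key
lemma foldl_pvStep_replicate (m : Nat) (out : List Int) (k c : Int) :
    (List.replicate m k).foldl pvStep (out, k, c) = (out, k, c + m) := by
  induction m generalizing c with
  | zero => simp
  | succ m ih =>
      rw [List.replicate_succ, List.foldl_cons]
      simp only [pvStep, BEq.rfl, if_true]
      rw [ih]
      congr 2
      push_cast
      ring

-- the run-length loop over concatenated runs emits one triple per run
lemma foldl_pvStep_runs (c : Int → Nat) :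
    ∀ (ks : List Int) (out : List Int) (k c0 : Int),
      (∀ j ∈ ks, 1 ≤ c j) → List.Pairwise (fun a b : Int => a ≠ b) (k :: ks) →
      (let s := (ks.flatMap (fun j => List.replicate (c j) j)).foldl pvStep (out, k, c0)
       s.1 ++ [s.2.1, s.2.2, 0])
        = (out ++ [k, c0, 0]) ++ ks.flatMap (fun j => [j, ((c j : Int)), 0]) := by
  intro ks
  induction ks with
  | nil => intro out k c0 _ _; simp
  | cons j ks ih =>
      intro out k c0 hpos hchain
      have hjk : k ≠ j := (List.pairwise_cons.mp hchain).1 j (List.mem_cons_self ..)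
      have hchain' : List.Pairwise (fun a b : Int => a ≠ b) (j :: ks) := hchain.of_cons
      have hcj : 1 ≤ c j := hpos j (List.mem_cons_self ..)
      have hrep : List.replicate (c j) j = j :: List.replicate (c j - 1) j := by
        rcases Nat.exists_eq_add_of_le hcj with ⟨m, hm⟩
        rw [hm]
        simp [Nat.add_comm, List.replicate_succ]
      simp only [List.flatMap_cons, hrep, List.cons_append, List.foldl_cons, List.foldl_append]
      have hstep : pvStep (out, k, c0) j = (out ++ [k, c0, 0], j, 1) := by
        simp [pvStep, Ne.symm hjk]
      rw [hstep, foldl_pvStep_replicate]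
      have h1 : (1 : Int) + ((c j - 1 : Nat) : Int) = (c j : Int) := by omega
      rw [h1]
      have hih := ih (out ++ [k, c0, 0]) j (c j)
          (fun x hx => hpos x (List.mem_cons_of_mem _ hx)) hchain'
      simp only at hih ⊢
      rw [hih]
      simp

-- B's grouping pass on a column equals the flatMap of triples over the sorted distinct keys
lemma alt_eq_flatMap (column : List Int) (rev : Bool) :
    (match PySem.List.sorted column (fun x => x) rev with
     | [] => ([] : List Int)
     | k :: rest =>
         let s := rest.foldl pvStep ([], k, 1)
         s.1 ++ [s.2.1, s.2.2, 0])
      = (PySem.List.sorted (PySem.Set.ofList column) (fun x => x) rev).flatMap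
          (fun k => [k, (column.count k : Int), 0]) := by
  set ks := PySem.List.sorted (PySem.Set.ofList column) (fun x => x) rev with hks
  have hmem : ∀ j ∈ ks, j ∈ column := by
    intro j hj
    rw [hks, PySem.List.mem_sorted, PySem.Set.mem_ofList] at hj
    exact hj
  have hchain : List.Pairwise (fun a b : Int => a ≠ b) ks := by
    have hpl := sortedSet_pairwise column rev
    rw [← hks] at hpl
    exact hpl.imp (fun {a b} h => by cases rev <;> simp_all <;> omega)
  rw [sorted_decomp column rev, ← hks]
  cases hkc : ks with
  | nil => simp
  | cons k0 ks' =>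
      have hk0 : k0 ∈ column := hmem k0 (hkc ▸ List.mem_cons_self ..)
      have hc0 : 1 ≤ column.count k0 := List.count_pos_iff.mpr hk0
      have hrep : List.replicate (column.count k0) k0
          = k0 :: List.replicate (column.count k0 - 1) k0 := by
        rcases Nat.exists_eq_add_of_le hc0 with ⟨m, hm⟩
        rw [hm]
        simp [Nat.add_comm, List.replicate_succ]
      simp only [List.flatMap_cons, hrep, List.cons_append, List.foldl_append]
      rw [foldl_pvStep_replicate]
      have h1 : (1 : Int) + ((column.count k0 - 1 : Nat) : Int) = (column.count k0 : Int) := by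
        omega
      rw [h1]
      have hchain' : List.Pairwise (fun a b : Int => a ≠ b) (k0 :: ks') := hkc ▸ hchain
      have hpos : ∀ j ∈ ks', 1 ≤ column.count j := by
        intro j hj
        exact List.count_pos_iff.mpr (hmem j (hkc ▸ List.mem_cons_of_mem _ hj))
      have hruns := foldl_pvStep_runs (fun j => column.count j) ks' [] k0
          ((column.count k0 : Int)) hpos hchain'
      simp only at hruns ⊢
      rw [hruns]
      simp

-- common pipeline for a fixed reverse flag
lemma pvPipeline (n : Int) (info : List (List Int)) (rev : Bool)
    (hrev : decide (n < 3) = rev) :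
    pvOutA (pvDictA n info) (pvKeysA (pvDictA n info) rev)
      = getValidHistoryList_alt n info := by
  unfold getValidHistoryList_alt
  simp only [hrev]
  rw [pvDictA_eq, pvKeysA_counter_eq, pvOutA_eq,
    ← alt_eq_flatMap (info.map (fun row => PySem.List.pyGetD row n 0)) rev]

-- ===== VERDICT (by name: the statement is the Claim_ definition above) =====
theorem getValidHistoryList_spec : Claim_equal_getValidHistoryList := by
  intro n info _ hpre
  unfold Spec_getValidHistoryList
  obtain ⟨hn, -⟩ := hpre
  rcases hn with rfl | rfl | rfl | rfl | rfl | rfl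
  · exact pvPipeline 0 info true rfl
  · exact pvPipeline 1 info true rfl
  · exact pvPipeline 2 info true rfl
  · exact pvPipeline 3 info false rfl
  · exact pvPipeline 4 info false rfl
  · exact pvPipeline 5 info false rfl
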